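-- pv_equiv track=rewrite | github.com/shg9411/algo | algo_py/boj/tmp4.py | solution
-- ===== SOURCE A (Python) =====
-- import heapq
--
-- def solution(N, coffee_times):
--     cur = 0
--     answer = []
--     robot = []
--     for idx, time in enumerate(coffee_times, start=1):
--         if len(robot) < N:
--             heapq.heappush(robot, (cur+time, idx))
--         else:
--             cur, index = heapq.heappop(robot)
--             answer.append(index)
--             heapq.heappush(robot, (cur+time, idx))
--     while robot:
--         answer.append(heapq.heappop(robot)[1])
--     return answer
-- ===== SOURCE B (Python) =====
-- def solution(N, coffee_times):
--     if not coffee_times: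
--         return []
--     robots = [(t, i) for i, t in enumerate(coffee_times[:N], start=1)]
--     answer = []
--     for i, t in enumerate(coffee_times[N:], start=N + 1):
--         j = min(range(len(robots)), key=lambda k: robots[k])
--         f, idx = robots[j]
--         answer.append(idx)
--         robots[j] = (f + t, i)
--     answer.extend(idx for _, idx in sorted(robots))
--     return answer
-- ===== Notes on version B (the rewrite author's own statement) =====
-- stated objective: alternative
-- what changed: Replaces the heapq priority queue with a plain fixed-size robot array: each step scans the array for the (finish_time, idx)-minimum and overwrites that slot in place, and the leftover robots are emitted by one final sort instead of repeated heap pops.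
import Mathlib
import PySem

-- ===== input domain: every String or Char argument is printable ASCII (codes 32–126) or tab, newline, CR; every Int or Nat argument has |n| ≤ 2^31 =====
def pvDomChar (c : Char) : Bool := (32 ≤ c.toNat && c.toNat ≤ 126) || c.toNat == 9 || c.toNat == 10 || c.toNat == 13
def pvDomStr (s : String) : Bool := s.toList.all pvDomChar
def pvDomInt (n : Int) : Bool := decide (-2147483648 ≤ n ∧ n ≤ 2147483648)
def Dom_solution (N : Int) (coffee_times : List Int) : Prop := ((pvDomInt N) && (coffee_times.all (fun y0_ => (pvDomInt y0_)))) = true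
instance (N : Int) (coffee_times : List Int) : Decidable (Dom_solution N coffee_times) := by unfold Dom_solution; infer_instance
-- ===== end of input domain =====

-- B replaces A's binary heap with a fixed array of robots scanned for the (finish_time, idx)-minimum
-- and a final sort of the leftovers: an alternative decomposition of the same simulation (not claimed faster).


-- Python's '<' on pairs of ints (tuple comparison, lexicographic); used by heapq in A and by min/sorted in B.
def tupleLt (a b : Int × Int) : Bool := decide (a.1 < b.1) || (!decide (b.1 < a.1) && decide (a.2 < b.2))

-- ===== PORT A =====
-- heapq is modeled at the level of its contract: the heap list holds the pushed, not-yet-popped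
-- pairs (push appends) and heappop returns the lexicographically least pair, removing it.
-- This is exact for every value A observes (popped pairs and len); only the internal array
-- layout of the heap is not reproduced.
def minFold (x : Int × Int) (xs : List (Int × Int)) : Int × Int :=
  xs.foldl (fun m y => if tupleLt y m then y else m) x

def popMin : List (Int × Int) → Option ((Int × Int) × List (Int × Int))
  | [] => none
  | x :: xs => some (minFold x xs, (x :: xs).erase (minFold x xs))

theorem minFold_mem (xs : List (Int × Int)) : ∀ x : Int × Int, minFold x xs ∈ x :: xs := by
  induction xs with
  | nil => intro x; simp [minFold]
  | cons y ys ih =>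
    intro x
    have hrw : minFold x (y :: ys) = minFold (if tupleLt y x then y else x) ys := by
      simp [minFold, List.foldl]
    rw [hrw]
    rcases List.mem_cons.mp (ih (if tupleLt y x then y else x)) with h1 | h1
    · rw [h1]; split <;> simp
    · simp [h1]

-- for idx, time in enumerate(coffee_times, start=1): … (cur, answer, robot threaded through)
def aLoop (N : Int) : List Int → Int → Int → List Int → List (Int × Int) → List Int × List (Int × Int)
  | [], _, _, ans, robot => (ans, robot)
  | t :: ts, idx, cur, ans, robot =>
    if (robot.length : Int) < N then
      aLoop N ts (idx + 1) cur ans (robot ++ [(cur + t, idx)])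
    else
      match popMin robot with
      | none => aLoop N ts (idx + 1) cur ans robot   -- Python raises IndexError here; excluded by Pre_solution
      | some (m, r') => aLoop N ts (idx + 1) m.1 (ans ++ [m.2]) (r' ++ [(m.1 + t, idx)])

-- while robot: answer.append(heapq.heappop(robot)[1])
def flushA : List (Int × Int) → List Int
  | [] => []
  | x :: xs => (minFold x xs).2 :: flushA ((x :: xs).erase (minFold x xs))
termination_by r => r.length
decreasing_by
  rw [List.length_erase_of_mem (minFold_mem xs x)]
  simp

def solution (N : Int) (coffee_times : List Int) : List Int :=
  let p := aLoop N coffee_times 1 0 [] []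
  p.1 ++ flushA p.2

-- ===== PORT B =====
-- j = min(range(len(robots)), key=lambda k: robots[k])   (first index of the lexicographic minimum)
def bArgmin (robots : List (Int × Int)) : Nat :=
  (List.range robots.length).foldl
    (fun best k => if tupleLt (robots.getD k (0, 0)) (robots.getD best (0, 0)) then k else best) 0

-- for i, t in enumerate(coffee_times[N:], start=N+1): …
def bLoop : List Int → Int → List (Int × Int) → List Int → List (Int × Int) × List Int
  | [], _, robots, ans => (robots, ans)
  | t :: ts, i, robots, ans =>
    let j := bArgmin robots
    let p := robots.getD j (0, 0)
    bLoop ts (i + 1) (robots.set j (p.1 + t, i)) (ans ++ [p.2])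

def solution_alt (N : Int) (coffee_times : List Int) : List Int :=
  if coffee_times = [] then []
  else
    let robots := ((PySem.List.slice coffee_times none (some N)).zipIdx.map
      (fun p => (p.1, (p.2 : Int) + 1)))
    let q := bLoop (PySem.List.slice coffee_times (some N) none) (N + 1) robots []
    q.2 ++ (PySem.List.sorted2 q.1 (fun p => p.1) (fun p => p.2)).map (fun p => p.2)

-- ===== PRECONDITION & SPEC =====
-- Pre_ excludes exactly the inputs where A raises: with N ≤ 0 and a nonempty task list,
-- heapq.heappop is called on an empty heap (IndexError).
def Pre_solution (N : Int) (coffee_times : List Int) : Prop := coffee_times = [] ∨ 1 ≤ N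
instance (N : Int) (coffee_times : List Int) : Decidable (Pre_solution N coffee_times) := by unfold Pre_solution; infer_instance
def pvWitness_solution : Int × List Int := (2, [3, 1, 2])

def Spec_solution (N : Int) (coffee_times : List Int) (out : List Int) : Prop := out = solution_alt N coffee_times
instance (N : Int) (coffee_times : List Int) (out : List Int) : Decidable (Spec_solution N coffee_times out) := by unfold Spec_solution; infer_instance

-- ===== CLAIM (what is proved, stated in full; the proofs are below) =====
def Claim_equal_solution : Prop := ∀ (N : Int) (coffee_times : List Int), Dom_solution N coffee_times → Pre_solution N coffee_times → Spec_solution N coffee_times (solution N coffee_times)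

-- ===== LEMMAS AND PROOFS =====

-- the pair-order relation "not strictly above": b ≤ a in Python's tuple order
theorem tupleLt_eq_false_iff (a b : Int × Int) :
    tupleLt a b = false ↔ (b.1 < a.1 ∨ (a.1 = b.1 ∧ b.2 ≤ a.2)) := by
  simp [tupleLt]; omega

theorem tupleLt_eq_true_iff (a b : Int × Int) :
    tupleLt a b = true ↔ (a.1 < b.1 ∨ (a.1 = b.1 ∧ a.2 < b.2)) := by
  simp [tupleLt]; omega

theorem tupleLt_irrefl (a : Int × Int) : tupleLt a a = false := by
  simp [tupleLt]

theorem tupleLt_antisymm {a b : Int × Int} (h1 : tupleLt a b = false) (h2 : tupleLt b a = false) :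
    a = b := by
  rw [tupleLt_eq_false_iff] at h1 h2
  obtain ⟨a1, a2⟩ := a; obtain ⟨b1, b2⟩ := b
  simp_all
  omega

theorem minFold_min (xs : List (Int × Int)) :
    ∀ x y : Int × Int, y ∈ x :: xs → tupleLt y (minFold x xs) = false := by
  induction xs with
  | nil =>
    intro x y hy
    simp at hy
    subst hy
    simp [minFold, tupleLt_irrefl]
  | cons z zs ih =>
    intro x y hy
    have hrw : minFold x (z :: zs) = minFold (if tupleLt z x then z else x) zs := by
      simp [minFold, List.foldl]
    rw [hrw]
    by_cases hzx : tupleLt z x = true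
    · rw [if_pos hzx]
      have hzm : tupleLt z (minFold z zs) = false := ih z z List.mem_cons_self
      rcases List.mem_cons.mp hy with rfl | h1
      · rw [tupleLt_eq_false_iff] at hzm ⊢
        rw [tupleLt_eq_true_iff] at hzx
        omega
      · rcases List.mem_cons.mp h1 with rfl | h2
        · exact hzm
        · exact ih z y (List.mem_cons_of_mem _ h2)
    · rw [if_neg hzx]
      simp only [Bool.not_eq_true] at hzx
      have hxm : tupleLt x (minFold x zs) = false := ih x x List.mem_cons_self
      rcases List.mem_cons.mp hy with rfl | h1
      · exact hxm
      · rcases List.mem_cons.mp h1 with rfl | h2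
        · rw [tupleLt_eq_false_iff] at hxm hzx ⊢
          omega
        · exact ih x y (List.mem_cons_of_mem _ h2)

theorem popMin_spec {r : List (Int × Int)} {m : Int × Int} {r' : List (Int × Int)}
    (h : popMin r = some (m, r')) :
    m ∈ r ∧ r' = r.erase m ∧ ∀ y ∈ r, tupleLt y m = false := by
  cases r with
  | nil => simp [popMin] at h
  | cons x xs =>
    simp only [popMin, Option.some.injEq, Prod.mk.injEq] at h
    obtain ⟨h1, h2⟩ := h
    subst h1; subst h2
    exact ⟨minFold_mem xs x, rfl, fun y hy => minFold_min xs x y hy⟩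

-- the minimum VALUE only depends on the multiset of pairs
theorem min_unique {r₁ r₂ : List (Int × Int)} {m₁ m₂ : Int × Int}
    (hperm : r₁.Perm r₂)
    (h₁ : m₁ ∈ r₁) (hmin₁ : ∀ y ∈ r₁, tupleLt y m₁ = false)
    (h₂ : m₂ ∈ r₂) (hmin₂ : ∀ y ∈ r₂, tupleLt y m₂ = false) : m₁ = m₂ := by
  have hm₁₂ : m₁ ∈ r₂ := hperm.mem_iff.mp h₁
  have hm₂₁ : m₂ ∈ r₁ := hperm.mem_iff.mpr h₂
  exact tupleLt_antisymm (hmin₂ m₁ hm₁₂) (hmin₁ m₂ hm₂₁)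

-- bArgmin returns a valid index of a minimal pair
theorem bArgmin_spec (r : List (Int × Int)) (hne : r ≠ []) :
    bArgmin r < r.length ∧ ∀ y ∈ r, tupleLt y (r.getD (bArgmin r) (0, 0)) = false := by
  have key : ∀ n, 1 ≤ n → n ≤ r.length →
      ((List.range n).foldl
        (fun best k => if tupleLt (r.getD k (0, 0)) (r.getD best (0, 0)) then k else best) 0) < n ∧
      ∀ k < n, tupleLt (r.getD k (0, 0))
        (r.getD ((List.range n).foldl
          (fun best k => if tupleLt (r.getD k (0, 0)) (r.getD best (0, 0)) then k else best) 0) (0, 0)) = false := by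
    intro n h1 h2
    induction n with
    | zero => omega
    | succ n ih =>
      by_cases hn : n = 0
      · subst hn
        simp only [Nat.zero_add]
        have h0 : (List.range 1).foldl
            (fun best k => if tupleLt (r.getD k (0, 0)) (r.getD best (0, 0)) then k else best) 0
            = 0 := by
          simp [List.range_succ]
        rw [h0]
        refine ⟨by omega, ?_⟩
        intro k hk
        have hk0 : k = 0 := by omega
        subst hk0
        exact tupleLt_irrefl _
      · have hn1 : 1 ≤ n := by omega
        obtain ⟨ihb, ihm⟩ := ih hn1 (by omega)
        set b := (List.range n).foldl
          (fun best k => if tupleLt (r.getD k (0, 0)) (r.getD best (0, 0)) then k else best) 0 with hb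
        have hfold : (List.range (n + 1)).foldl
            (fun best k => if tupleLt (r.getD k (0, 0)) (r.getD best (0, 0)) then k else best) 0
            = if tupleLt (r.getD n (0, 0)) (r.getD b (0, 0)) then n else b := by
          rw [List.range_succ, List.foldl_append]
          simp [hb]
        rw [hfold]
        by_cases hc : tupleLt (r.getD n (0, 0)) (r.getD b (0, 0)) = true
        · rw [if_pos hc]
          refine ⟨by omega, ?_⟩
          intro k hk
          by_cases hkn : k = n
          · subst hkn; exact tupleLt_irrefl _
          · have := ihm k (by omega)
            rw [tupleLt_eq_false_iff] at this ⊢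
            rw [tupleLt_eq_true_iff] at hc
            omega
        · simp only [Bool.not_eq_true] at hc
          rw [if_neg (by rw [hc]; simp)]
          refine ⟨by omega, ?_⟩
          intro k hk
          by_cases hkn : k = n
          · subst hkn; exact hc
          · exact ihm k (by omega)
  have hlen : 1 ≤ r.length := by
    cases r with
    | nil => exact absurd rfl hne
    | cons _ _ => simp
  obtain ⟨hb, hm⟩ := key r.length hlen le_rfl
  refine ⟨hb, ?_⟩
  intro y hy
  obtain ⟨k, hk, rfl⟩ := List.mem_iff_getElem.mp hy
  have := hm k hk
  rwa [List.getD_eq_getElem r (0, 0) hk] at this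

-- one replacement step preserves the multiset relation between A's heap and B's robot array
theorem set_perm_erase_append {r₁ r₂ : List (Int × Int)} {m v : Int × Int} {j : Nat}
    (hperm : r₁.Perm r₂) (hm : m ∈ r₁) (hj : j < r₂.length) (hgj : r₂[j] = m) :
    (r₂.set j v).Perm (r₁.erase m ++ [v]) := by
  have hdecomp : r₂ = r₂.take j ++ m :: r₂.drop (j + 1) := by
    conv_lhs => rw [← List.take_append_drop j r₂]
    rw [List.drop_eq_getElem_cons hj, hgj]
  have hset : r₂.set j v = r₂.take j ++ v :: r₂.drop (j + 1) := by
    rw [List.set_eq_take_append_cons_drop, if_pos hj]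
  have h1 : (r₂.set j v).Perm (v :: (r₂.take j ++ r₂.drop (j + 1))) := by
    rw [hset]; exact List.perm_middle
  have h2 : r₂.Perm (m :: (r₂.take j ++ r₂.drop (j + 1))) := by
    conv_lhs => rw [hdecomp]
    exact List.perm_middle
  have h3 : r₁.Perm (m :: r₁.erase m) := List.perm_cons_erase hm
  have h4 : (m :: (r₂.take j ++ r₂.drop (j + 1))).Perm (m :: r₁.erase m) :=
    (h2.symm.trans hperm.symm).trans h3
  have h5 : (r₂.take j ++ r₂.drop (j + 1)).Perm (r₁.erase m) := h4.cons_inv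
  exact h1.trans ((h5.cons v).trans (List.perm_append_singleton v _).symm)

-- the main phase: once the heap is full, A's pop/push and B's min-scan/overwrite stay in lockstep
theorem mainLoop (N : Int) (ts : List Int) :
    ∀ (idx cur : Int) (ans : List Int) (r₁ r₂ : List (Int × Int)),
      r₁.Perm r₂ → N ≤ (r₁.length : Int) → r₁ ≠ [] →
      (aLoop N ts idx cur ans r₁).1 = (bLoop ts idx r₂ ans).2 ∧
      (aLoop N ts idx cur ans r₁).2.Perm (bLoop ts idx r₂ ans).1 := by
  induction ts with
  | nil =>
    intro idx cur ans r₁ r₂ hperm hN hne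
    exact ⟨rfl, hperm⟩
  | cons t ts ih =>
    intro idx cur ans r₁ r₂ hperm hN hne
    have hne₂ : r₂ ≠ [] := by
      intro h; subst h
      exact hne (List.eq_nil_of_length_eq_zero (hperm.length_eq.trans rfl))
    -- A's step
    have hnotlt : ¬ ((r₁.length : Int) < N) := by omega
    obtain ⟨x, xs, rfl⟩ := List.exists_cons_of_ne_nil hne
    have hpop : popMin (x :: xs) = some (minFold x xs, (x :: xs).erase (minFold x xs)) := rfl
    set m := minFold x xs with hm
    obtain ⟨hmem, _, hmin⟩ := popMin_spec hpop
    -- B's step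
    obtain ⟨hj, hjmin⟩ := bArgmin_spec r₂ hne₂
    set j := bArgmin r₂ with hjdef
    have hgetD : r₂.getD j (0, 0) = r₂[j] := List.getD_eq_getElem r₂ (0, 0) hj
    have hpm : r₂[j] = m := by
      refine (min_unique hperm.symm (List.getElem_mem hj) ?_ hmem hmin).symm ▸ rfl
      intro y hy
      have := hjmin y hy
      rwa [hgetD] at this
    have hA : aLoop N (t :: ts) idx cur ans (x :: xs)
        = aLoop N ts (idx + 1) m.1 (ans ++ [m.2]) ((x :: xs).erase m ++ [(m.1 + t, idx)]) := by
      show (if (((x :: xs).length : Int) < N) then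
          aLoop N ts (idx + 1) cur ans ((x :: xs) ++ [(cur + t, idx)])
        else
          match popMin (x :: xs) with
          | none => aLoop N ts (idx + 1) cur ans (x :: xs)
          | some (m, r') => aLoop N ts (idx + 1) m.1 (ans ++ [m.2]) (r' ++ [(m.1 + t, idx)])) = _
      rw [if_neg hnotlt, hpop]
    have hB : bLoop (t :: ts) idx r₂ ans
        = bLoop ts (idx + 1) (r₂.set j (m.1 + t, idx)) (ans ++ [m.2]) := by
      show bLoop ts (idx + 1)
          (r₂.set (bArgmin r₂) ((r₂.getD (bArgmin r₂) (0, 0)).1 + t, idx))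
          (ans ++ [(r₂.getD (bArgmin r₂) (0, 0)).2]) = _
      rw [← hjdef, hgetD, hpm]
    rw [hA, hB]
    have hperm' : ((x :: xs).erase m ++ [(m.1 + t, idx)]).Perm (r₂.set j (m.1 + t, idx)) :=
      (set_perm_erase_append hperm hmem hj hpm).symm
    have hlen' : N ≤ ((((x :: xs).erase m) ++ [(m.1 + t, idx)]).length : Int) := by
      rw [List.length_append, List.length_erase_of_mem hmem]
      simp only [List.length_cons] at *
      push_cast
      omega
    exact ih (idx + 1) m.1 (ans ++ [m.2]) _ _ hperm' hlen' (by simp)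

-- seeding: while the heap is not full A only pushes, with cur still 0
def seedOf (cur idx : Int) : List Int → List (Int × Int)
  | [] => []
  | t :: ts => (cur + t, idx) :: seedOf cur (idx + 1) ts

theorem seedOf_length (cur idx : Int) (ts : List Int) : (seedOf cur idx ts).length = ts.length := by
  induction ts generalizing idx with
  | nil => rfl
  | cons t ts ih => simp [seedOf, ih]

theorem aLoop_seed (N : Int) (ts ts' : List Int) :
    ∀ (robot : List (Int × Int)) (idx cur : Int) (ans : List Int),
      ((robot.length : Int) + (ts.length : Int) ≤ N) →
      aLoop N (ts ++ ts') idx cur ans robot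
        = aLoop N ts' (idx + (ts.length : Int)) cur ans (robot ++ seedOf cur idx ts) := by
  induction ts with
  | nil =>
    intro robot idx cur ans h
    simp [seedOf]
  | cons t ts ih =>
    intro robot idx cur ans h
    simp only [List.length_cons] at h
    have hlt : (robot.length : Int) < N := by push_cast at h ⊢; omega
    have hstep : aLoop N ((t :: ts) ++ ts') idx cur ans robot
        = aLoop N (ts ++ ts') (idx + 1) cur ans (robot ++ [(cur + t, idx)]) := by
      rw [List.cons_append, aLoop, if_pos hlt]
    rw [hstep, ih (robot ++ [(cur + t, idx)]) (idx + 1) cur ans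
      (by simp only [List.length_append, List.length_singleton]; push_cast at h ⊢; omega)]
    congr 1
    · push_cast [List.length_cons]
      ring
    · rw [List.append_assoc]
      rfl

-- B's seed comprehension builds exactly the same robot list
theorem zipIdx_seed (ts : List Int) :
    ∀ k : Nat, (ts.zipIdx k).map (fun p => (p.1, (p.2 : Int) + 1)) = seedOf 0 ((k : Int) + 1) ts := by
  induction ts with
  | nil => intro k; rfl
  | cons t ts ih =>
    intro k
    rw [List.zipIdx_cons, List.map_cons, ih (k + 1)]
    show (t, (k : Int) + 1) :: seedOf 0 (((k + 1 : Nat) : Int) + 1) ts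
      = seedOf 0 ((k : Int) + 1) (t :: ts)
    rw [show (((k + 1 : Nat) : Int) + 1) = ((k : Int) + 1) + 1 by push_cast; ring]
    simp [seedOf]

-- selection order of the leftover heap (proof-only helper)
def selSort : List (Int × Int) → List (Int × Int)
  | [] => []
  | x :: xs => minFold x xs :: selSort ((x :: xs).erase (minFold x xs))
termination_by r => r.length
decreasing_by
  rw [List.length_erase_of_mem (minFold_mem xs x)]
  simp

theorem flushA_eq_selSort (r : List (Int × Int)) : flushA r = (selSort r).map (fun p => p.2) := by
  induction r using selSort.induct with
  | case1 => rw [flushA, selSort]; rfl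
  | case2 x xs ih => rw [flushA, selSort, List.map_cons, ih]

theorem selSort_perm (r : List (Int × Int)) : (selSort r).Perm r := by
  induction r using selSort.induct with
  | case1 => rw [selSort]
  | case2 x xs ih =>
    rw [selSort]
    exact (ih.cons _).trans (List.perm_cons_erase (minFold_mem xs x)).symm

theorem selSort_pairwise (r : List (Int × Int)) :
    (selSort r).Pairwise (fun a b => tupleLt b a = false) := by
  induction r using selSort.induct with
  | case1 => rw [selSort]; exact List.Pairwise.nil
  | case2 x xs ih =>
    rw [selSort]
    refine List.Pairwise.cons ?_ ih
    intro b hb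
    have hb' : b ∈ (x :: xs).erase (minFold x xs) := (selSort_perm _).mem_iff.mp hb
    exact minFold_min xs x b (List.mem_of_mem_erase hb')

-- insertion into a sorted-so-far list keeps it sorted
theorem insertBy_pairwise (x : Int × Int) (l : List (Int × Int))
    (h : l.Pairwise (fun a b => tupleLt b a = false)) :
    (PySem.List.insertBy tupleLt x l).Pairwise (fun a b => tupleLt b a = false) := by
  induction l with
  | nil => simp [PySem.List.insertBy]
  | cons y ys ih =>
    rw [List.pairwise_cons] at h
    obtain ⟨hy, hys⟩ := h
    by_cases hc : tupleLt x y = true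
    · rw [PySem.List.insertBy, if_pos hc]
      refine List.Pairwise.cons ?_ (List.Pairwise.cons hy hys)
      intro b hb
      rcases List.mem_cons.mp hb with rfl | hb
      · rw [tupleLt_eq_false_iff]; rw [tupleLt_eq_true_iff] at hc; omega
      · have := hy b hb
        rw [tupleLt_eq_false_iff] at this ⊢
        rw [tupleLt_eq_true_iff] at hc
        omega
    · rw [PySem.List.insertBy, if_neg hc]
      refine List.Pairwise.cons ?_ (ih hys)
      intro b hb
      rcases (PySem.List.mem_insertBy tupleLt x b ys).mp hb with rfl | hb
      · simpa using hc
      · exact hy b hb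

theorem sorted2_eq_foldl (xs : List (Int × Int)) :
    PySem.List.sorted2 xs (fun p => p.1) (fun p => p.2)
      = xs.foldl (fun acc x => PySem.List.insertBy tupleLt x acc) [] := rfl

theorem sorted2_pairwise (xs : List (Int × Int)) :
    (PySem.List.sorted2 xs (fun p => p.1) (fun p => p.2)).Pairwise
      (fun a b => tupleLt b a = false) := by
  rw [sorted2_eq_foldl]
  suffices h : ∀ acc : List (Int × Int), acc.Pairwise (fun a b => tupleLt b a = false) →
      (xs.foldl (fun acc x => PySem.List.insertBy tupleLt x acc) acc).Pairwise
        (fun a b => tupleLt b a = false) by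
    exact h [] List.Pairwise.nil
  induction xs with
  | nil => intro acc hacc; exact hacc
  | cons x xs ih =>
    intro acc hacc
    exact ih _ (insertBy_pairwise x acc hacc)

-- the flush of A's heap is B's sorted leftover list, for any permutation of it
theorem flush_eq_sorted {r₁ r₂ : List (Int × Int)} (hperm : r₁.Perm r₂) :
    flushA r₁ = (PySem.List.sorted2 r₂ (fun p => p.1) (fun p => p.2)).map (fun p => p.2) := by
  rw [flushA_eq_selSort]
  congr 1
  refine List.Perm.eq_of_pairwise ?_ (selSort_pairwise r₁) (sorted2_pairwise r₂) ?_
  · intro a b _ _ h1 h2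
    exact tupleLt_antisymm h2 h1
  · exact (selSort_perm r₁).trans (hperm.trans (PySem.List.sorted2_perm r₂ _ _ _).symm)

-- ===== VERDICT (by name: the statement is the Claim_ definition above) =====
theorem solution_spec : Claim_equal_solution := by
  intro N ct _ hpre
  unfold Spec_solution
  by_cases hct : ct = []
  · subst hct
    simp [solution, aLoop, solution_alt, flushA]
  · have hN : 1 ≤ N := by
      rcases hpre with h | h
      · exact absurd h hct
      · exact h
    have hNnat : ((N.toNat : Nat) : Int) = N := Int.toNat_of_nonneg (by omega)
    have hsl1 : PySem.List.slice ct none (some N) = ct.take N.toNat := by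
      conv_lhs => rw [← hNnat]
      rw [PySem.List.slice_to_natCast]
    have hsl2 : PySem.List.slice ct (some N) none = ct.drop N.toNat := by
      conv_lhs => rw [← hNnat]
      rw [PySem.List.slice_from_natCast]
    have hseed : ((ct.take N.toNat).zipIdx.map (fun p => (p.1, (p.2 : Int) + 1)))
        = seedOf 0 1 (ct.take N.toNat) := by
      simpa using zipIdx_seed (ct.take N.toNat) 0
    simp only [solution_alt, hsl1, hsl2, hseed]
    rw [if_neg hct]
    by_cases hc : (ct.length : Int) ≤ N
    · -- all tasks are seeds: the main loop is empty
      have htake : ct.take N.toNat = ct := List.take_of_length_le (by omega)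
      have hdrop : ct.drop N.toNat = [] := List.drop_eq_nil_of_le (by omega)
      rw [htake, hdrop]
      rw [show bLoop [] (N + 1) (seedOf 0 1 ct) [] = ((seedOf 0 1 ct), ([] : List Int)) from rfl]
      have hA : aLoop N ct 1 0 [] [] = ([], seedOf 0 1 ct) := by
        have := aLoop_seed N ct [] [] 1 0 [] (by simpa using hc)
        simpa using this
      rw [solution, hA]
      exact flush_eq_sorted (List.Perm.refl _)
    · -- the heap fills up with the first N tasks, then the main loop runs
      have hsplit : ct = ct.take N.toNat ++ ct.drop N.toNat := (List.take_append_drop _ _).symm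
      have hlen_take : (ct.take N.toNat).length = N.toNat := by
        rw [List.length_take]; omega
      have hA : aLoop N ct 1 0 [] []
          = aLoop N (ct.drop N.toNat) (1 + ((ct.take N.toNat).length : Int)) 0 []
              (seedOf 0 1 (ct.take N.toNat)) := by
        conv_lhs => rw [hsplit]
        rw [aLoop_seed N _ _ [] 1 0 [] (by rw [hlen_take]; simp; omega)]
        simp [Int.add_comm]
      rw [solution, hA]
      have hidx : N + 1 = 1 + ((ct.take N.toNat).length : Int) := by
        rw [hlen_take]; omega
      rw [hidx]
      have hlenseed : (seedOf 0 1 (ct.take N.toNat)).length = N.toNat := by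
        rw [seedOf_length, hlen_take]
      obtain ⟨heq, hperm⟩ := mainLoop N (ct.drop N.toNat)
        (1 + ((ct.take N.toNat).length : Int)) 0 [] (seedOf 0 1 (ct.take N.toNat))
        (seedOf 0 1 (ct.take N.toNat)) (List.Perm.refl _)
        (by rw [hlenseed]; omega)
        (List.ne_nil_of_length_pos (by rw [hlenseed]; omega))
      rw [heq]
      congr 1
      exact flush_eq_sorted hperm
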